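-- pv_equiv track=rewrite | github.com/Saketh-Reddy-Bejadi/Python | Practice/Product of Binary Decimals.py | is_binary_decimal
-- ===== SOURCE A (Python) =====
-- import math
--
-- def is_binary_decimal(x):
--     for i in range(2, int(math.sqrt(x)) + 1):
--         if x % i == 0:
--             while x % i == 0:
--                 x //= i
--             if x == 1:
--                 return True
--             else:
--                 return False
--     return x == 1
-- ===== SOURCE B (Python) =====
-- def _iroot(n, k):
--     # largest r >= 1 with r ** k <= n, by binary search (n >= 1)
--     lo, hi = 1, n
--     while lo < hi:
--         mid = (lo + hi + 1) // 2
--         if mid ** k <= n: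
--             lo = mid
--         else:
--             hi = mid - 1
--     return lo
--
--
-- def _isprime(r):
--     if r < 2:
--         return False
--     d = 2
--     while d * d <= r:
--         if r % d == 0:
--             return False
--         d += 1
--     return True
--
--
-- def is_binary_decimal(x):
--     if x < 2:
--         return x == 1
--     k = 2
--     while 2 ** k <= x:
--         r = _iroot(x, k)
--         if r ** k == x and _isprime(r):
--             return True
--         k += 1
--     return False
-- ===== Notes on version B (the rewrite author's own statement) =====
-- stated objective: alternative
-- what changed: B never factorizes x: for each exponent k with 2**k <= x it extracts the integer k-th root r by binary search and returns True iff some r**k == x with r prime (primality of the small root by trial division), instead of A's trial division of x itself up to sqrt(x) with early return on the first prime factor.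
import Mathlib
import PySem

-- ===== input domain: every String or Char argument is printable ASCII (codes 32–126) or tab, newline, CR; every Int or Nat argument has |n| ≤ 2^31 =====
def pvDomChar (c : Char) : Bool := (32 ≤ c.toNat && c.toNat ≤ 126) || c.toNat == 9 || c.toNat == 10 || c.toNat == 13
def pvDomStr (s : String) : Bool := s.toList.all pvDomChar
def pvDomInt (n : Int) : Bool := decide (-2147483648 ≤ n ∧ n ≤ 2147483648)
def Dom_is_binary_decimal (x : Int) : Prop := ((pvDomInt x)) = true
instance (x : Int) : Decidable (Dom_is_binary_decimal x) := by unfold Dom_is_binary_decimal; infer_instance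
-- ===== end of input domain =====

-- B re-implements A without factorizing x: it looks for an exponent k ≥ 2 whose integer
-- k-th root r (binary search) satisfies r^k = x with r prime; objective: alternative algorithm.

-- ===== PORT A =====
-- inner 'while x % i == 0: x //= i'; the Nat argument is only termination fuel (x.toNat suffices)
def pvDivOutA : Nat → Int → Int → Int
  | 0, x, _ => x
  | f+1, x, i => if PySem.Int.mod x i = 0 then pvDivOutA f (PySem.Int.floordiv x i) i else x

-- 'for i in range(2, s+1)' with its early returns; the Nat argument is only termination fuel
def pvLoopA : Nat → Int → Int → Int → Bool
  | 0, x, _, _ => x == 1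
  | f+1, x, s, i =>
    if s < i then x == 1
    else if PySem.Int.mod x i = 0 then pvDivOutA x.toNat x i == 1
    else pvLoopA f x s (i+1)

def is_binary_decimal (x : Int) : Bool :=
  -- int(math.sqrt(x)) is ported as Nat.sqrt x.toNat: exact for 0 ≤ x ≤ 2^31 (the stated
  -- domain, where the float sqrt is exact enough); x < 0 raises ValueError, excluded by Pre_
  pvLoopA (x.toNat + 1) x (Int.ofNat (Nat.sqrt x.toNat)) 2

-- ===== PORT B =====
-- _iroot's 'while lo < hi' binary search; the Nat argument is only termination fuel
-- (the exponent k is always ≥ 2 here, so 'mid ** k' is ported as mid ^ k.toNat)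
def pvIrootB : Nat → Int → Int → Int → Int → Int
  | 0, _, _, lo, _ => lo
  | f+1, n, k, lo, hi =>
    if lo < hi then
      let mid := PySem.Int.floordiv (lo + hi + 1) 2
      if mid ^ k.toNat ≤ n then pvIrootB f n k mid hi
      else pvIrootB f n k lo (mid - 1)
    else lo

-- _isprime's 'while d * d <= r'; the Nat argument is only termination fuel
def pvIsPrimeLoopB : Nat → Int → Int → Bool
  | 0, _, _ => true
  | f+1, r, d =>
    if d * d ≤ r then
      if PySem.Int.mod r d = 0 then false else pvIsPrimeLoopB f r (d + 1)
    else true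

def pvIsPrimeB (r : Int) : Bool := if r < 2 then false else pvIsPrimeLoopB r.toNat r 2

-- outer 'while 2 ** k <= x' with the early 'return True'; the Nat argument is only termination fuel
def pvLoopB : Nat → Int → Int → Bool
  | 0, _, _ => false
  | f+1, x, k =>
    if (2 : Int) ^ k.toNat ≤ x then
      let r := pvIrootB x.toNat x k 1 x
      if r ^ k.toNat == x && pvIsPrimeB r then true
      else pvLoopB f x (k + 1)
    else false

def is_binary_decimal_alt (x : Int) : Bool :=
  if x < 2 then x == 1 else pvLoopB x.toNat x 2

-- ===== PRECONDITION & SPEC =====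
-- math.sqrt raises ValueError for x < 0, so A only returns on nonnegative x
def Pre_is_binary_decimal (x : Int) : Prop := 0 ≤ x
instance (x : Int) : Decidable (Pre_is_binary_decimal x) := by unfold Pre_is_binary_decimal; infer_instance
def pvWitness_is_binary_decimal : Int := 12

def Spec_is_binary_decimal (x : Int) (out : Bool) : Prop := out = is_binary_decimal_alt x
instance (x : Int) (out : Bool) : Decidable (Spec_is_binary_decimal x out) := by
  unfold Spec_is_binary_decimal; infer_instance

-- ===== CLAIM (what is proved, stated in full; the proofs are below) =====
def Claim_equal_is_binary_decimal : Prop :=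
  ∀ (x : Int), Dom_is_binary_decimal x → Pre_is_binary_decimal x →
    Spec_is_binary_decimal x (is_binary_decimal x)

-- ===== LEMMAS AND PROOFS =====

-- strip all factors p from n, and the number of factors stripped
def stripN (n p : Nat) : Nat :=
  if h : 1 < p ∧ 0 < n ∧ p ∣ n then stripN (n / p) p else n
termination_by n
decreasing_by exact Nat.div_lt_self h.2.1 h.1

def expN (n p : Nat) : Nat :=
  if h : 1 < p ∧ 0 < n ∧ p ∣ n then expN (n / p) p + 1 else 0
termination_by n
decreasing_by exact Nat.div_lt_self h.2.1 h.1

theorem stripN_step {n p : Nat} (hp : 1 < p) (hn : 0 < n) (hd : p ∣ n) :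
    stripN n p = stripN (n / p) p := by
  conv_lhs => rw [stripN, dif_pos ⟨hp, hn, hd⟩]

theorem stripN_nostep {n p : Nat} (h : ¬ (1 < p ∧ 0 < n ∧ p ∣ n)) : stripN n p = n := by
  rw [stripN, dif_neg h]

theorem pow_expN_mul_stripN (n p : Nat) : p ^ expN n p * stripN n p = n := by
  induction n using Nat.strong_induction_on with
  | _ n ih =>
    rw [stripN, expN]
    split
    · next h =>
      rw [pow_succ]
      have := ih _ (Nat.div_lt_self h.2.1 h.1)
      calc p ^ expN (n / p) p * p * stripN (n / p) p
          = p * (p ^ expN (n / p) p * stripN (n / p) p) := by ring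
        _ = p * (n / p) := by rw [this]
        _ = n := Nat.mul_div_cancel' h.2.2
    · simp

theorem stripN_pow {p : Nat} (hp : 1 < p) (k : Nat) : stripN (p ^ k) p = 1 := by
  induction k with
  | zero =>
    rw [pow_zero, stripN_nostep]
    rintro ⟨h1, _, h3⟩
    exact absurd (Nat.le_of_dvd one_pos h3) (by omega)
  | succ k ih =>
    rw [stripN_step hp (Nat.pow_pos (by omega)) (dvd_pow_self p (Nat.succ_ne_zero k)),
      show p ^ (k + 1) / p = p ^ k from by rw [pow_succ']; exact Nat.mul_div_cancel_left (p ^ k) (by omega)]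
    exact ih

-- minFac is the first divisor found by scanning upward
theorem minFac_eq_of_scan {n j : Nat} (h2 : 2 ≤ n) (hj : 2 ≤ j) (hd : j ∣ n)
    (hmin : ∀ k, 2 ≤ k → k < j → ¬ k ∣ n) : n.minFac = j := by
  have h1 : n.minFac ≤ j := Nat.minFac_le_of_dvd hj hd
  have h2' : 2 ≤ n.minFac := (Nat.minFac_prime (by omega)).two_le
  by_contra hne
  exact hmin n.minFac h2' (by omega) n.minFac_dvd

theorem minFac_le_sqrt_iff {n : Nat} (h2 : 2 ≤ n) : n.minFac ≤ Nat.sqrt n ↔ ¬ n.Prime := by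
  constructor
  · intro hle hp
    rw [hp.minFac_eq] at hle
    exact absurd hle (not_le.2 (Nat.sqrt_lt_self (by omega)))
  · intro hp
    have := Nat.minFac_sq_le_self (by omega) hp
    exact Nat.le_sqrt.2 (by nlinarith [this])

theorem mod_cast_zero_iff (n j : Nat) : PySem.Int.mod (n : Int) (j : Int) = 0 ↔ j ∣ n := by
  rw [PySem.Int.mod_eq_zero_iff_dvd]
  exact Int.natCast_dvd_natCast

-- ---- characterization of A's port ----

theorem pvDivOutA_eq {f n j : Nat} (hj : 1 < j) (hn : 0 < n) (hf : n ≤ f) :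
    pvDivOutA f (n : Int) (j : Int) = ((stripN n j : Nat) : Int) := by
  induction f generalizing n with
  | zero => omega
  | succ f ih =>
    rw [pvDivOutA]
    by_cases hd : j ∣ n
    · rw [if_pos ((mod_cast_zero_iff n j).2 hd), PySem.Int.floordiv_natCast,
        ih (Nat.div_pos (Nat.le_of_dvd hn hd) (by omega))
          (by have := Nat.div_lt_self hn hj; omega),
        ← stripN_step hj hn hd]
    · rw [if_neg (fun h => hd ((mod_cast_zero_iff n j).1 h)),
        stripN_nostep (fun h => hd h.2.2)]

theorem pvLoopA_eq {f n j : Nat} (s : Int) (h2 : 2 ≤ n) (hj : 2 ≤ j)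
    (hf : (s + 1 - (j : Int)).toNat ≤ f)
    (hmin : ∀ k, 2 ≤ k → k < j → ¬ k ∣ n) :
    pvLoopA f (n : Int) s (j : Int) =
      if ((n.minFac : Nat) : Int) ≤ s then decide (stripN n n.minFac = 1) else false := by
  have hnotle : ∀ (hs : s < (j : Int)), ¬ ((n.minFac : Nat) : Int) ≤ s := by
    intro hs hle
    have h2' : 2 ≤ n.minFac := (Nat.minFac_prime (by omega)).two_le
    have : n.minFac < j := by exact_mod_cast lt_of_le_of_lt hle hs
    exact hmin n.minFac h2' this n.minFac_dvd
  induction f generalizing j with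
  | zero =>
    have hs : s < (j : Int) := by omega
    rw [pvLoopA, if_neg (hnotle hs)]
    simp only [beq_eq_false_iff_ne, ne_eq]
    omega
  | succ f ih =>
    rw [pvLoopA]
    by_cases hs : s < (j : Int)
    · rw [if_pos hs, if_neg (hnotle hs)]
      simp only [beq_eq_false_iff_ne, ne_eq]
      omega
    · rw [if_neg hs]
      by_cases hd : j ∣ n
      · rw [if_pos ((mod_cast_zero_iff n j).2 hd)]
        have hmf : n.minFac = j := minFac_eq_of_scan h2 hj hd hmin
        rw [if_pos (by rw [hmf]; omega)]
        rw [show ((n : Int).toNat) = n from Int.toNat_natCast n,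
          pvDivOutA_eq (by omega) (by omega) le_rfl, hmf]
        by_cases h1 : stripN n j = 1 <;> simp [h1]
      · rw [if_neg (fun h => hd ((mod_cast_zero_iff n j).1 h))]
        have : ((j : Int) + 1) = ((j + 1 : Nat) : Int) := by push_cast; ring
        rw [this]
        apply ih (by omega) (by omega)
        · intro k hk hkj
          rcases Nat.lt_or_ge k j with h | h
          · exact hmin k hk h
          · have : k = j := by omega
            subst this; exact hd
        · intro hs' hle
          have h2' : 2 ≤ n.minFac := (Nat.minFac_prime (by omega)).two_le
          have : n.minFac < j + 1 := by exact_mod_cast lt_of_le_of_lt hle hs'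
          rcases Nat.lt_or_ge n.minFac j with h | h
          · exact hmin n.minFac h2' h n.minFac_dvd
          · exact hd (by rw [show j = n.minFac by omega]; exact n.minFac_dvd)

theorem A_char {n : Nat} (h2 : 2 ≤ n) :
    is_binary_decimal (n : Int) = (decide (¬ n.Prime) && decide (stripN n n.minFac = 1)) := by
  unfold is_binary_decimal
  rw [show ((n : Int).toNat) = n from Int.toNat_natCast n,
    show ((2 : Int)) = ((2 : Nat) : Int) by norm_num]
  rw [pvLoopA_eq (Int.ofNat (Nat.sqrt n)) h2 le_rfl
    (by have := Nat.sqrt_le_self n; simp only [Int.ofNat_eq_natCast]; omega)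
    (by intro k hk hkj; omega)]
  have hiff := minFac_le_sqrt_iff h2
  by_cases hp : n.Prime
  · rw [if_neg (by simp only [Int.ofNat_eq_natCast]; exact_mod_cast fun h => (hiff.1 h) hp)]
    simp [hp]
  · rw [if_pos (by simp only [Int.ofNat_eq_natCast]; exact_mod_cast hiff.2 hp)]
    simp [hp]

-- ---- characterization of B's port ----

-- binary-search invariant: the result r satisfies r^K ≤ n < (r+1)^K
theorem pvIrootB_spec {K : Nat} (_hK : 1 ≤ K) :
    ∀ (f : Nat) (n lo hi : Int), 1 ≤ lo → lo ≤ hi → lo ^ K ≤ n → n < (hi + 1) ^ K →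
    (hi - lo).toNat ≤ f →
    1 ≤ pvIrootB f n (K : Int) lo hi ∧ (pvIrootB f n (K : Int) lo hi) ^ K ≤ n ∧
      n < (pvIrootB f n (K : Int) lo hi + 1) ^ K := by
  intro f
  induction f with
  | zero =>
    intro n lo hi h1 hlh hlo hhi hf
    have : lo = hi := by omega
    subst this
    exact ⟨h1, by simpa [pvIrootB] using hlo, by simpa [pvIrootB] using hhi⟩
  | succ f ih =>
    intro n lo hi h1 hlh hlo hhi hf
    rw [pvIrootB]
    by_cases hlt : lo < hi
    · rw [if_pos hlt]
      have hmid := PySem.Int.floordiv_two_mid_bounds (lo := lo + 1) (hi := hi) (by omega)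
      have hmid1 : lo + 1 ≤ PySem.Int.floordiv (lo + 1 + hi) 2 := hmid.1
      have hmid2 : PySem.Int.floordiv (lo + 1 + hi) 2 ≤ hi := hmid.2
      have harg : lo + hi + 1 = lo + 1 + hi := by ring
      rw [harg]
      set mid := PySem.Int.floordiv (lo + 1 + hi) 2 with hmiddef
      rw [show ((K : Int)).toNat = K from Int.toNat_natCast K]
      by_cases hc : mid ^ K ≤ n
      · rw [if_pos hc]
        exact ih n mid hi (by omega) (by omega) hc hhi (by omega)
      · rw [if_neg hc]
        exact ih n lo (mid - 1) (by omega) (by omega) hlo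
          (by rw [show mid - 1 + 1 = mid by ring]; omega) (by omega)
    · rw [if_neg hlt]
      have : lo = hi := by omega
      subst this
      exact ⟨h1, hlo, hhi⟩

-- the r with r^K ≤ n < (r+1)^K is unique among positive integers
theorem iroot_unique {K : Nat} (_hK : 1 ≤ K) {n r p : Int} (h1r : 1 ≤ r) (h1p : 1 ≤ p)
    (hr1 : r ^ K ≤ n) (hr2 : n < (r + 1) ^ K) (hp1 : p ^ K ≤ n) (hp2 : n < (p + 1) ^ K) :
    r = p := by
  by_contra hne
  rcases lt_or_gt_of_ne hne with h | h
  · have : (r + 1) ^ K ≤ p ^ K := pow_le_pow_left₀ (by omega) (by omega) K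
    omega
  · have : (p + 1) ^ K ≤ r ^ K := pow_le_pow_left₀ (by omega) (by omega) K
    omega

-- the trial-division primality loop
theorem pvIsPrimeLoopB_eq :
    ∀ (f r d : Nat), 2 ≤ d → r + 1 ≤ d + f →
    (pvIsPrimeLoopB f (r : Int) (d : Int) = true ↔ (∀ e, d ≤ e → e * e ≤ r → ¬ e ∣ r)) := by
  intro f
  induction f with
  | zero =>
    intro r d hd hf
    rw [pvIsPrimeLoopB]
    have h : ∀ e, d ≤ e → e * e ≤ r → ¬ e ∣ r := by
      intro e he hee
      have : e ≤ e * e := Nat.le_mul_of_pos_left e (by omega)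
      omega
    exact iff_of_true rfl h
  | succ f ih =>
    intro r d hd hf
    rw [pvIsPrimeLoopB]
    by_cases hdd : d * d ≤ r
    · rw [if_pos (by exact_mod_cast hdd)]
      by_cases hdvd : d ∣ r
      · rw [if_pos ((mod_cast_zero_iff r d).2 hdvd)]
        exact iff_of_false (by simp) (fun h => h d le_rfl hdd hdvd)
      · rw [if_neg (fun h => hdvd ((mod_cast_zero_iff r d).1 h))]
        rw [show ((d : Int) + 1) = ((d + 1 : Nat) : Int) by push_cast; ring]
        rw [ih r (d + 1) (by omega) (by omega)]
        constructor
        · intro h e he hee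
          rcases Nat.lt_or_ge e (d + 1) with h' | h'
          · have : e = d := by omega
            subst this; exact hdvd
          · exact h e h' hee
        · intro h e he hee
          exact h e (by omega) hee
    · rw [if_neg (by exact_mod_cast hdd)]
      have h : ∀ e, d ≤ e → e * e ≤ r → ¬ e ∣ r := by
        intro e he hee
        have : d * d ≤ e * e := Nat.mul_le_mul he he
        omega
      exact iff_of_true rfl h

theorem pvIsPrimeB_eq (r : Nat) : pvIsPrimeB (r : Int) = decide r.Prime := by
  unfold pvIsPrimeB
  rcases Nat.lt_or_ge r 2 with h | h
  · rw [if_pos (by exact_mod_cast h)]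
    have : ¬ r.Prime := fun hp => absurd hp.two_le (by omega)
    simp [this]
  · rw [if_neg (by omega),
      show ((r : Int).toNat) = r from Int.toNat_natCast r,
      show ((2 : Int)) = ((2 : Nat) : Int) by norm_num]
    rw [Bool.eq_iff_iff, pvIsPrimeLoopB_eq r r 2 le_rfl (by omega), decide_eq_true_eq]
    constructor
    · intro hnd
      by_contra hp
      have hsq := Nat.minFac_sq_le_self (by omega) hp
      have h2' : 2 ≤ r.minFac := (Nat.minFac_prime (by omega)).two_le
      exact hnd r.minFac h2' (by nlinarith) r.minFac_dvd
    · intro hp e he hee hdvd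
      rcases (hp.eq_one_or_self_of_dvd e hdvd) with h' | h'
      · omega
      · subst h'; nlinarith

-- n is a prime power with exponent at least j
def isPrimePowFrom (j n : Nat) : Prop := ∃ K p, j ≤ K ∧ p.Prime ∧ n = p ^ K

theorem pvLoopB_eq :
    ∀ (f n j : Nat), 2 ≤ n → 2 ≤ j → n + 1 ≤ j + f →
    (pvLoopB f (n : Int) (j : Int) = true ↔ isPrimePowFrom j n) := by
  intro f
  induction f with
  | zero =>
    intro n j h2 hj hf
    rw [pvLoopB]
    have : ¬ isPrimePowFrom j n := by
      rintro ⟨K, p, hK, hp, rfl⟩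
      have h1 : 2 ^ K ≤ p ^ K := Nat.pow_le_pow_left hp.two_le K
      have h2 : K < 2 ^ K := Nat.lt_two_pow_self
      omega
    exact iff_of_false (by simp) this
  | succ f ih =>
    intro n j h2 hj hf
    rw [pvLoopB]
    rw [show ((j : Int)).toNat = j from Int.toNat_natCast j]
    by_cases hcond : 2 ^ j ≤ n
    · rw [if_pos (by exact_mod_cast hcond)]
      rw [show ((n : Int).toNat) = n from Int.toNat_natCast n]
      have hroot := pvIrootB_spec (K := j) (by omega) n (n : Int) 1 (n : Int)
        le_rfl (by exact_mod_cast (by omega : 1 ≤ n)) (by simpa using (by exact_mod_cast (by omega : 1 ≤ n) : (1:Int) ≤ n))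
        (by
          have h1 : (n + 1 : Nat) ≤ (n + 1) ^ j := Nat.le_self_pow (by omega) _
          have h2 : ((n : Int) + 1) ^ j = (((n + 1) ^ j : Nat) : Int) := by push_cast; ring
          rw [h2]; exact_mod_cast (by omega : n < (n + 1) ^ j))
        (by omega)
      set r := pvIrootB n (n : Int) (j : Int) 1 (n : Int) with hrdef
      obtain ⟨hr1, hr2, hr3⟩ := hroot
      by_cases htest : (r ^ j == (n : Int) && pvIsPrimeB r) = true
      · rw [if_pos htest]
        rw [Bool.and_eq_true, beq_iff_eq] at htest
        obtain ⟨heq, hprime⟩ := htest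
        have hrn : r = ((r.toNat : Nat) : Int) := (Int.toNat_of_nonneg (by omega)).symm
        rw [hrn, pvIsPrimeB_eq] at hprime
        have hpp : isPrimePowFrom j n := by
          refine ⟨j, r.toNat, le_rfl, of_decide_eq_true hprime, ?_⟩
          have : ((r.toNat : Nat) : Int) ^ j = ((r.toNat ^ j : Nat) : Int) := by push_cast; ring
          rw [hrn, this] at heq
          exact_mod_cast heq.symm
        exact iff_of_true rfl hpp
      · rw [if_neg htest]
        rw [show ((j : Int) + 1) = ((j + 1 : Nat) : Int) by push_cast; ring]
        rw [ih n (j + 1) h2 (by omega) (by omega)]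
        constructor
        · rintro ⟨K, p, hK, hp, rfl⟩
          exact ⟨K, p, by omega, hp, rfl⟩
        · rintro ⟨K, p, hK, hp, rfl⟩
          rcases Nat.lt_or_ge K (j + 1) with h' | h'
          · have hKj : K = j := by omega
            subst hKj
            exfalso
            apply htest
            have hpr : r = ((p : Nat) : Int) := by
              apply iroot_unique (by omega : 1 ≤ K) hr1
                (by exact_mod_cast hp.one_lt.le) hr2 hr3
              · exact_mod_cast Nat.le_refl (p ^ K)
              · exact_mod_cast Nat.pow_lt_pow_left (by omega) (by omega)
            rw [Bool.and_eq_true, beq_iff_eq, hpr, pvIsPrimeB_eq]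
            exact ⟨by push_cast; ring, decide_eq_true hp⟩
          · exact ⟨K, p, h', hp, rfl⟩
    · rw [if_neg (by exact_mod_cast hcond)]
      have : ¬ isPrimePowFrom j n := by
        rintro ⟨K, p, hK, hp, rfl⟩
        have h1 : 2 ^ K ≤ p ^ K := Nat.pow_le_pow_left hp.two_le K
        have h2 : 2 ^ j ≤ 2 ^ K := Nat.pow_le_pow_right (by omega) hK
        omega
      exact iff_of_false (by simp) this

theorem B_char {n : Nat} (h2 : 2 ≤ n) :
    (is_binary_decimal_alt (n : Int) = true ↔ isPrimePowFrom 2 n) := by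
  unfold is_binary_decimal_alt
  rw [if_neg (by omega),
    show ((n : Int).toNat) = n from Int.toNat_natCast n,
    show ((2 : Int)) = ((2 : Nat) : Int) by norm_num,
    pvLoopB_eq n n 2 h2 le_rfl (by omega)]

-- ---- the two characterizations agree ----

theorem char_iff {n : Nat} (h2 : 2 ≤ n) :
    (¬ n.Prime ∧ stripN n n.minFac = 1) ↔ isPrimePowFrom 2 n := by
  have hp : n.minFac.Prime := Nat.minFac_prime (by omega)
  constructor
  · rintro ⟨hnp, hs⟩
    have hpow := pow_expN_mul_stripN n n.minFac
    rw [hs, mul_one] at hpow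
    refine ⟨expN n n.minFac, n.minFac, ?_, hp, hpow.symm⟩
    rcases Nat.lt_or_ge (expN n n.minFac) 2 with h | h
    · exfalso
      have h' : expN n n.minFac = 0 ∨ expN n n.minFac = 1 := by omega
      rcases h' with h' | h' <;> rw [h'] at hpow
      · rw [pow_zero] at hpow; omega
      · rw [pow_one] at hpow; exact hnp (hpow ▸ hp)
    · exact h
  · rintro ⟨K, p, hK, hpr, rfl⟩
    have hmf : (p ^ K).minFac = p := by
      have hd : (p ^ K).minFac ∣ p ^ K := Nat.minFac_dvd _
      have hpr' : (p ^ K).minFac.Prime := Nat.minFac_prime (by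
        have : 2 ≤ p ^ K := le_trans hpr.two_le (Nat.le_self_pow (by omega) p)
        omega)
      have := hpr'.dvd_of_dvd_pow hd
      exact (Nat.prime_dvd_prime_iff_eq hpr' hpr).1 this
    constructor
    · intro hprime
      have hd : p ∣ p ^ K := dvd_pow_self p (by omega)
      rcases hprime.eq_one_or_self_of_dvd p hd with h' | h'
      · exact absurd h' (by have := hpr.two_le; omega)
      · have : p ^ 1 < p ^ K := Nat.pow_lt_pow_right hpr.one_lt (by omega)
        rw [pow_one] at this
        omega
    · rw [hmf]
      exact stripN_pow hpr.one_lt K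

-- ===== VERDICT (by name: the statement is the Claim_ definition above) =====
theorem is_binary_decimal_spec : Claim_equal_is_binary_decimal := by
  intro x _ hpre
  unfold Spec_is_binary_decimal
  unfold Pre_is_binary_decimal at hpre
  obtain ⟨n, rfl⟩ : ∃ n : Nat, x = (n : Int) := ⟨x.toNat, (Int.toNat_of_nonneg hpre).symm⟩
  by_cases h0 : n = 0
  · subst h0; rfl
  by_cases h1 : n = 1
  · subst h1; rfl
  have h2 : 2 ≤ n := by omega
  rw [A_char h2, Bool.eq_iff_iff, Bool.and_eq_true, decide_eq_true_eq, decide_eq_true_eq,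
    B_char h2]
  exact char_iff h2
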